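-- pv_equiv track=rewrite | github.com/joaoh82/leetcode_with_python | k_consecutive_number.py | solution
-- ===== SOURCE A (Python) =====
-- def solution(arr, k):
--     size = len(arr)
--     result = []
--     for i in range(size):
--         limit = i - k
--         product = 1
--         if i - k < 1:
--             limit = -1
--         for j in range(i, limit, -1):
--             product *= arr[j]
--         result.append(product)
--     return result
-- ===== SOURCE B (Python) =====
-- def solution(arr, k):
--     # Sliding window: running product of the nonzero elements plus a zero count,
--     # advancing a left pointer, instead of recomputing each window's product.
--     result = []
--     left = 0
--     prod = 1
--     zeros = 0
--     for i, x in enumerate(arr):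
--         if x == 0:
--             zeros += 1
--         else:
--             prod *= x
--         lo = 0 if i - k < 1 else i - k + 1
--         while left < lo and left <= i:
--             y = arr[left]
--             if y == 0:
--                 zeros -= 1
--             else:
--                 prod //= y
--             left += 1
--         result.append(0 if zeros > 0 else prod)
--     return result
-- ===== Notes on version B (the rewrite author's own statement) =====
-- stated objective: faster
-- what changed: Replaces A's per-index inner loop that re-multiplies the whole window by a single pass maintaining a sliding window via a left pointer, a running product of the window's nonzero elements (updated by exact integer division when an element leaves) and a zero count.
import Mathlib
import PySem

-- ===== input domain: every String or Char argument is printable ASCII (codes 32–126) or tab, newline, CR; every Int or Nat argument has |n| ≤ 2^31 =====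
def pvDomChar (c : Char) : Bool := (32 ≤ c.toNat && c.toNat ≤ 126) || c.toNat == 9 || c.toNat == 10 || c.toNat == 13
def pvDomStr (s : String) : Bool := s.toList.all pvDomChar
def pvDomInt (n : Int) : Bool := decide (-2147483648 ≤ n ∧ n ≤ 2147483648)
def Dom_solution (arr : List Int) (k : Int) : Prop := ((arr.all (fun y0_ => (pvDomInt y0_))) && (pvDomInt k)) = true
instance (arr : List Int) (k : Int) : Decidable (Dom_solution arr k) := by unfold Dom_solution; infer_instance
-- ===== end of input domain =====

-- B replaces A's per-index inner product loop by a one-pass sliding window keeping a running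
-- product of the window's nonzero elements plus a zero count (objective: faster, O(n*k) -> O(n)).


-- ===== PORT A =====
-- literal transliteration of Source A; arr[j] (index always in range here) is ported as pyGetD
def solution (arr : List Int) (k : Int) : List Int :=
  let size : Int := (arr.length : Int)
  (PySem.List.pyRange 0 size 1).foldl (fun result i =>
    let limit := i - k
    let limit := if i - k < 1 then (-1 : Int) else limit
    let product := (PySem.List.pyRange i limit (-1)).foldl
      (fun product j => product * PySem.List.pyGetD arr j 0) 1
    result ++ [product]) []

-- ===== PORT B =====
-- Source B's 'while left < lo and left <= i' pop loop (arr[left] always in range, ported as pyGetD);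
-- ported as structural recursion on an exact fuel = the loop's iteration count
def popLoop (arr : List Int) (lo i : Int) : Nat → Int → Int → Int → Int × Int × Int
  | 0, left, prod, zeros => (left, prod, zeros)
  | fuel + 1, left, prod, zeros =>
    if left < lo ∧ left ≤ i then
      let y := PySem.List.pyGetD arr left 0
      popLoop arr lo i fuel (left + 1)
        (if y = 0 then prod else PySem.Int.floordiv prod y)
        (if y = 0 then zeros - 1 else zeros)
    else (left, prod, zeros)

-- Source B's loop body over (i, x) with state (result, left, prod, zeros)
def stepB (arr : List Int) (k : Int) (st : List Int × Int × Int × Int) (p : Int × Int) :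
    List Int × Int × Int × Int :=
  let zeros := if p.2 = 0 then st.2.2.2 + 1 else st.2.2.2
  let prod := if p.2 = 0 then st.2.2.1 else st.2.2.1 * p.2
  let lo : Int := if p.1 - k < 1 then 0 else p.1 - k + 1
  let s := popLoop arr lo p.1 (min lo (p.1 + 1) - st.2.1).toNat st.2.1 prod zeros
  (st.1 ++ [if s.2.2 > 0 then 0 else s.2.1], s.1, s.2.1, s.2.2)

def solution_alt (arr : List Int) (k : Int) : List Int :=
  ((PySem.List.enumerate arr 0).foldl (stepB arr k) ([], 0, 1, 0)).1

-- ===== PRECONDITION & SPEC =====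
def Spec_solution (arr : List Int) (k : Int) (out : List Int) : Prop := out = solution_alt arr k
instance (arr : List Int) (k : Int) (out : List Int) : Decidable (Spec_solution arr k out) := by unfold Spec_solution; infer_instance

-- ===== CLAIM (what is proved, stated in full; the proofs are below) =====
def Claim_equal_solution : Prop := ∀ (arr : List Int) (k : Int), Dom_solution arr k → Spec_solution arr k (solution arr k)

-- ===== LEMMAS AND PROOFS =====

-- proof-side abbreviations: element access, true window product, nonzero product, zero count, window start
def gA (arr : List Int) (j : Int) : Int := PySem.List.pyGetD arr j 0
def wProd (arr : List Int) (a b : Int) : Int :=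
  ((PySem.List.pyRange a b 1).map (gA arr)).prod
def nzP (arr : List Int) (a b : Int) : Int :=
  ((PySem.List.pyRange a b 1).map (fun j => if gA arr j = 0 then 1 else gA arr j)).prod
def zC (arr : List Int) (a b : Int) : Int :=
  ((PySem.List.pyRange a b 1).map (fun j => if gA arr j = 0 then (1 : Int) else 0)).sum
def loI (k i : Int) : Int := if i - k < 1 then 0 else i - k + 1

lemma nzP_empty (arr : List Int) {a b : Int} (h : b ≤ a) : nzP arr a b = 1 := by
  simp [nzP, PySem.List.pyRange_one_eq_nil h]

lemma zC_empty (arr : List Int) {a b : Int} (h : b ≤ a) : zC arr a b = 0 := by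
  simp [zC, PySem.List.pyRange_one_eq_nil h]

lemma nzP_cons (arr : List Int) {a b : Int} (h : a < b) :
    nzP arr a b = (if gA arr a = 0 then 1 else gA arr a) * nzP arr (a + 1) b := by
  simp [nzP, PySem.List.pyRange_one_cons h]

lemma zC_cons (arr : List Int) {a b : Int} (h : a < b) :
    zC arr a b = (if gA arr a = 0 then (1 : Int) else 0) + zC arr (a + 1) b := by
  simp [zC, PySem.List.pyRange_one_cons h]

lemma nzP_succ_right (arr : List Int) {a b : Int} (h : a ≤ b) :
    nzP arr a (b + 1) = nzP arr a b * (if gA arr b = 0 then 1 else gA arr b) := by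
  simp [nzP, PySem.List.pyRange_one_succ_right h]

lemma zC_succ_right (arr : List Int) {a b : Int} (h : a ≤ b) :
    zC arr a (b + 1) = zC arr a b + (if gA arr b = 0 then (1 : Int) else 0) := by
  simp [zC, PySem.List.pyRange_one_succ_right h]

lemma zC_nonneg (arr : List Int) (a b : Int) : 0 ≤ zC arr a b := by
  by_cases hab : b ≤ a
  · simp [zC_empty arr hab]
  · rw [not_le] at hab
    have hn : ∃ n : Nat, (b - a).toNat = n := ⟨_, rfl⟩
    obtain ⟨n, hn⟩ := hn
    induction n generalizing a with
    | zero => omega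
    | succ n ih =>
      rw [zC_cons arr hab]
      by_cases h2 : b ≤ a + 1
      · have : zC arr (a + 1) b = 0 := zC_empty arr h2
        rw [this]; split_ifs <;> omega
      · push_neg at h2
        have := ih (a + 1) h2 (by omega)
        split_ifs <;> omega

-- the window's true product is 0 iff the window contains a zero, else the nonzero product
lemma wz (arr : List Int) (a b : Int) :
    wProd arr a b = if 0 < zC arr a b then 0 else nzP arr a b := by
  by_cases hab : b ≤ a
  · simp [wProd, nzP, zC, PySem.List.pyRange_one_eq_nil hab]
  · rw [not_le] at hab
    have hn : ∃ n : Nat, (b - a).toNat = n := ⟨_, rfl⟩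
    obtain ⟨n, hn⟩ := hn
    induction n generalizing a with
    | zero => omega
    | succ n ih =>
      have hw : wProd arr a b = gA arr a * wProd arr (a + 1) b := by
        simp [wProd, PySem.List.pyRange_one_cons hab]
      have htail : wProd arr (a + 1) b = if 0 < zC arr (a + 1) b then 0 else nzP arr (a + 1) b := by
        by_cases h2 : b ≤ a + 1
        · simp [wProd, nzP, PySem.List.pyRange_one_eq_nil h2, zC_empty arr h2]
        · exact ih (a + 1) (by omega) (by omega)
      have hz := zC_nonneg arr (a + 1) b
      rw [hw, htail, zC_cons arr hab, nzP_cons arr hab]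
      by_cases hz' : 0 < zC arr (a + 1) b
      · rw [if_pos hz', mul_zero, if_pos (by split_ifs <;> omega)]
      · rw [if_neg hz']
        by_cases hy : gA arr a = 0
        · rw [if_pos (by rw [if_pos hy]; omega), hy, zero_mul]
        · rw [if_neg (by rw [if_neg hy]; omega), if_neg hy]

-- A's descending inner loop computes the window product
lemma foldl_mul_eq_prod (arr : List Int) (l : List Int) (c : Int) :
    l.foldl (fun p j => p * gA arr j) c = c * (l.map (gA arr)).prod := by
  induction l generalizing c with
  | nil => simp
  | cons x t ih => simp [List.foldl_cons, ih]; ring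

lemma innerA (arr : List Int) (i limit : Int) :
    (PySem.List.pyRange i limit (-1)).foldl (fun p j => p * PySem.List.pyGetD arr j 0) 1
      = wProd arr (limit + 1) (i + 1) := by
  have : (PySem.List.pyRange i limit (-1)).foldl (fun p j => p * gA arr j) 1
      = 1 * ((PySem.List.pyRange i limit (-1)).map (gA arr)).prod := foldl_mul_eq_prod arr _ 1
  simpa [gA, wProd, PySem.List.pyRange_neg_one_eq_reverse] using this

-- characterization of A
lemma solutionA_eq (arr : List Int) (k : Int) :
    solution arr k
      = (List.range arr.length).map (fun j : Nat => wProd arr (loI k (j : Int)) ((j : Int) + 1)) := by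
  unfold solution
  rw [PySem.List.foldl_append_singleton_eq_map]
  rw [PySem.List.pyRange_one, List.map_map]
  simp only [sub_zero, Int.toNat_natCast]
  refine List.map_congr_left (fun j _ => ?_)
  simp only [Function.comp_apply, zero_add, innerA]
  congr 1
  unfold loI
  split_ifs <;> ring

lemma popLoop_spec (arr : List Int) (lo i : Int) :
    ∀ (n : Nat) (left : Int), (min lo (i + 1) - left).toNat ≤ n → 0 ≤ left → left ≤ i + 1 →
      popLoop arr lo i n left (nzP arr left (i + 1)) (zC arr left (i + 1))
        = (min (max left lo) (i + 1),
           nzP arr (min (max left lo) (i + 1)) (i + 1),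
           zC arr (min (max left lo) (i + 1)) (i + 1)) := by
  intro n
  induction n with
  | zero =>
    intro left hm h0 hle
    rw [popLoop]
    have : min (max left lo) (i + 1) = left := by omega
    rw [this]
  | succ n ih =>
    intro left hm h0 hle
    rw [popLoop]
    by_cases hcond : left < lo ∧ left ≤ i
    · rw [if_pos hcond]
      have hlt : left < i + 1 := by omega
      have hcons := nzP_cons arr hlt
      have hzcons := zC_cons arr hlt
      have hrec : (if PySem.List.pyGetD arr left 0 = 0 then nzP arr left (i + 1)
            else PySem.Int.floordiv (nzP arr left (i + 1)) (PySem.List.pyGetD arr left 0))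
          = nzP arr (left + 1) (i + 1) := by
        by_cases hy : gA arr left = 0
        · rw [if_pos (by exact hy), hcons, if_pos hy, one_mul]
        · rw [if_neg (by exact hy), hcons, if_neg hy]
          show Int.fdiv _ _ = _
          exact Int.mul_fdiv_cancel_left _ hy
      have hzrec : (if PySem.List.pyGetD arr left 0 = 0 then zC arr left (i + 1) - 1
            else zC arr left (i + 1)) = zC arr (left + 1) (i + 1) := by
        by_cases hy : gA arr left = 0
        · rw [if_pos (by exact hy), hzcons, if_pos hy]; ring
        · rw [if_neg (by exact hy), hzcons, if_neg hy]; ring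
      simp only [hrec, hzrec]
      rw [ih (left + 1) (by omega) (by omega) (by omega)]
      have : min (max (left + 1) lo) (i + 1) = min (max left lo) (i + 1) := by omega
      rw [this]
    · rw [if_neg hcond]
      have : min (max left lo) (i + 1) = left := by omega
      rw [this]

lemma loI_nonneg (k i : Int) : 0 ≤ loI k i := by unfold loI; split_ifs <;> omega

lemma loI_mono (k i : Int) : loI k i ≤ loI k (i + 1) := by unfold loI; split_ifs <;> omega

lemma wProd_min (arr : List Int) (lo c : Int) : wProd arr (min lo c) c = wProd arr lo c := by
  by_cases h : lo ≤ c
  · rw [min_eq_left h]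
  · rw [min_eq_right (by omega)]
    unfold wProd
    rw [PySem.List.pyRange_one_eq_nil (le_refl c), PySem.List.pyRange_one_eq_nil (by omega)]

lemma fold_inv (arr : List Int) (k : Int) :
    ∀ (rest : List Int) (m : Nat) (res : List Int) (left : Int),
      arr.drop m = rest → 0 ≤ left → left ≤ (m : Int) → left ≤ loI k (m : Int) →
      ∃ l', (PySem.List.enumerate rest (m : Int)).foldl (stepB arr k)
              (res, left, nzP arr left (m : Int), zC arr left (m : Int))
          = (res ++ (List.range' m rest.length).map
                (fun j : Nat => wProd arr (loI k (j : Int)) ((j : Int) + 1)),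
             l', nzP arr l' ((m : Int) + rest.length), zC arr l' ((m : Int) + rest.length))
          ∧ 0 ≤ l' ∧ l' ≤ (m : Int) + rest.length ∧ l' ≤ loI k ((m : Int) + rest.length) := by
  intro rest
  induction rest with
  | nil =>
    intro m res left hdrop h0 hm hlo
    exact ⟨left, by simp [PySem.List.enumerate_nil], h0, by simpa using hm, by simpa using hlo⟩
  | cons x rest' ih =>
    intro m res left hdrop h0 hm hlo
    have hx : gA arr (m : Int) = x := by
      have h1 : arr[m]? = some x := by
        have h := congrArg (fun l : List Int => l[0]?) hdrop
        simpa using h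
      unfold gA
      rw [PySem.List.pyGetD_natCast, List.getD_eq_getElem?_getD, h1]
      rfl
    have hlt : left ≤ (m : Int) + 1 := by omega
    have hprod : (if x = 0 then nzP arr left (m : Int) else nzP arr left (m : Int) * x)
        = nzP arr left ((m : Int) + 1) := by
      rw [nzP_succ_right arr hm, ← hx]
      by_cases hy : gA arr (m : Int) = 0
      · simp [hy]
      · simp [hy]
    have hzer : (if x = 0 then zC arr left (m : Int) + 1 else zC arr left (m : Int))
        = zC arr left ((m : Int) + 1) := by
      rw [zC_succ_right arr hm, ← hx]
      by_cases hy : gA arr (m : Int) = 0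
      · simp [hy]
      · simp [hy]
    have hmax : max left (loI k (m : Int)) = loI k (m : Int) := max_eq_right hlo
    have hval : (if (0:Int) < zC arr (min (loI k (m : Int)) ((m : Int) + 1)) ((m : Int) + 1)
          then (0:Int)
          else nzP arr (min (loI k (m : Int)) ((m : Int) + 1)) ((m : Int) + 1))
        = wProd arr (loI k (m : Int)) ((m : Int) + 1) := by
      rw [← wz, wProd_min]
    have hstep : stepB arr k (res, left, nzP arr left (m : Int), zC arr left (m : Int)) ((m : Int), x)
        = (res ++ [wProd arr (loI k (m : Int)) ((m : Int) + 1)],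
           min (loI k (m : Int)) ((m : Int) + 1),
           nzP arr (min (loI k (m : Int)) ((m : Int) + 1)) ((m : Int) + 1),
           zC arr (min (loI k (m : Int)) ((m : Int) + 1)) ((m : Int) + 1)) := by
      unfold stepB
      dsimp only
      rw [hprod, hzer,
        show (if (m : Int) - k < 1 then (0:Int) else (m : Int) - k + 1) = loI k (m : Int) from rfl,
        popLoop_spec arr (loI k (m : Int)) (m : Int)
          ((min (loI k (m : Int)) ((m : Int) + 1) - left).toNat) left le_rfl h0 hlt]
      dsimp only
      rw [hmax]
      simp only [gt_iff_lt]
      rw [hval]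
    obtain ⟨l', hfold, hl0, hl1, hl2⟩ :=
      ih (m + 1) (res ++ [wProd arr (loI k (m : Int)) ((m : Int) + 1)])
        (min (loI k (m : Int)) ((m : Int) + 1))
        (by rw [← List.tail_drop, hdrop]; rfl)
        (le_min (loI_nonneg k _) (by omega))
        (by push_cast; exact min_le_right _ _)
        (by push_cast; exact le_trans (min_le_left _ _) (loI_mono k (m : Int)))
    have hc1 : ((m + 1 : Nat) : Int) = (m : Int) + 1 := by push_cast; ring
    rw [hc1] at hfold
    refine ⟨l', ?_, hl0, ?_, ?_⟩
    · rw [PySem.List.enumerate_cons, List.foldl_cons, hstep, hfold]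
      simp only [List.length_cons, List.range'_succ, List.map_cons]
      rw [List.append_cons]
      push_cast
      ring_nf
      simp
    · simp only [List.length_cons]
      push_cast at hl1 ⊢
      omega
    · simp only [List.length_cons]
      push_cast at hl2 ⊢
      ring_nf at hl2 ⊢
      exact hl2

-- ===== VERDICT (by name: the statement is the Claim_ definition above) =====
theorem solution_spec : Claim_equal_solution := by
  intro arr k _
  unfold Spec_solution
  rw [solutionA_eq]
  unfold solution_alt
  obtain ⟨l', hfold, -, -, -⟩ :=
    fold_inv arr k arr 0 [] 0 rfl le_rfl (by simp) (by simpa using loI_nonneg k 0)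
  simp only [Nat.cast_zero] at hfold
  rw [nzP_empty arr le_rfl, zC_empty arr le_rfl] at hfold
  rw [hfold]
  simp [List.range_eq_range']
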